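-- pv_equiv track=rewrite | github.com/michaelgale/toolbox-py | toolbox/datautils.py | are_words_in_word_list
-- ===== SOURCE A (Python) =====
-- def are_words_in_word_list(
--     words, word_list, case_sensitive=False, get_score=False, all_must_match=True
-- ):
--     """Checks if word(s) are contained in another word list.
--     The search can be performed with or without case sensitivity.
--     The check words can contain wildcards, e.g. "abc*" to allow
--     a wider range of matches against the word list."""
--     if isinstance(word_list, str):
--         word_list = word_list.split()
--     if not isinstance(words, list):
--         check_words = [words]
--     else:
--         check_words = words
--     found = {}
--     for w in check_words:
--         word = w.lower() if not case_sensitive else w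
--         if "*" in word:
--             idx = word.find("*") - 1
--             word = word[:idx]
--
--         for wl in word_list:
--             wl = wl.lower() if not case_sensitive else wl
--             if wl.startswith(word):
--                 found[word] = True
--     if all_must_match and len(found) == len(check_words):
--         if get_score:
--             return True, len(found)
--         return True
--     if not all_must_match and len(found) > 0:
--         if get_score:
--             return True, len(found)
--         return True
--     if get_score:
--         return False, len(found)
--     return False
-- ===== SOURCE B (Python) =====
-- def are_words_in_word_list(
--     words, word_list, case_sensitive=False, get_score=False, all_must_match=True
-- ):
--     """Hash-set re-implementation: index every prefix of every list word once,
--     then each (deduplicated, normalized) check word is a single set lookup.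
--     Matches A on every input, including the (ok, score) tuple when get_score."""
--     if isinstance(word_list, str):
--         word_list = word_list.split()
--     check_words = words if isinstance(words, list) else [words]
--     pool = word_list if case_sensitive else [w.lower() for w in word_list]
--     prefixes = {w[:i] for w in pool for i in range(len(w) + 1)}
--     keys = set()
--     for w in check_words:
--         k = w if case_sensitive else w.lower()
--         i = k.find("*")
--         if i >= 0:
--             k = k[: i - 1]
--         keys.add(k)
--     score = sum(1 for k in keys if k in prefixes)
--     ok = score == len(check_words) if all_must_match else score > 0
--     if get_score:
--         return ok, score
--     return ok
-- ===== Notes on version B (the rewrite author's own statement) =====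
-- stated objective: faster
-- what changed: Instead of rescanning the whole word list for every check word with startswith, B builds a hash set of all prefixes of the (lowercased) word list once and answers each deduplicated normalized check word with a single set lookup; B matches A on every input, including the (ok, score) tuple when get_score=True.
-- outside the precondition, e.g. on are_words_in_word_list(['ab'], ['abc'], False, True, True): A returns (True, 1), B returns (True, 1)
import Mathlib
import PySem

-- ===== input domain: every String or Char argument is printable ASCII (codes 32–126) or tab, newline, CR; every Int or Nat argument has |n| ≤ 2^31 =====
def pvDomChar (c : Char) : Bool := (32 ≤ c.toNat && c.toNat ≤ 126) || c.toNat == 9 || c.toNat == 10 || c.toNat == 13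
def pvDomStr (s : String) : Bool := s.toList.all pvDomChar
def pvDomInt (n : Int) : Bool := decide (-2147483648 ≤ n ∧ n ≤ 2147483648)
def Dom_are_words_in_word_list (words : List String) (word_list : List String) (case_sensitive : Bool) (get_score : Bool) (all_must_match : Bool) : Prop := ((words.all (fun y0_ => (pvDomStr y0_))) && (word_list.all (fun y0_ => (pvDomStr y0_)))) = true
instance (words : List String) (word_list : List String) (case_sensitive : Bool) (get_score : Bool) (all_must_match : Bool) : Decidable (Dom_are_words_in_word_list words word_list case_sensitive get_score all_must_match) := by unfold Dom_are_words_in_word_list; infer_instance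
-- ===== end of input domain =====

-- B replaces A's nested rescans of word_list with a prefix hash-set built once plus one lookup
-- per deduplicated check word (objective: faster). Python B returns A's exact value on EVERY input,
-- including the (bool, int) tuple when get_score=True; the Bool-typed Lean claim below covers
-- get_score=False, the inputs on which that value is a Bool.

-- ===== PORT A =====
def are_words_in_word_list (words : List String) (word_list : List String) (case_sensitive : Bool) (get_score : Bool) (all_must_match : Bool) : Bool :=
  let found : PySem.Dict String Bool :=
    words.foldl (fun found w =>
      let word := if !case_sensitive then PySem.Str.lower w else w
      let word :=
        if PySem.Str.isIn "*" word then
          let idx := PySem.Str.find word "*" - 1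
          PySem.Str.slice word none (some idx)
        else word
      word_list.foldl (fun found wl =>
        let wl' := if !case_sensitive then PySem.Str.lower wl else wl
        if PySem.Str.startswith wl' word then found.insert word true else found) found)
      (PySem.Dict.mk [])
  -- with get_score=True Python returns the tuple (bool, len(found)): inexpressible in Bool, excluded by Pre_
  if all_must_match && (found.size == words.length) then true
  else if !all_must_match && decide (0 < found.size) then true
  else false

-- ===== PORT B =====
def pvNormWord (case_sensitive : Bool) (w : String) : String :=
  let k := if case_sensitive then w else PySem.Str.lower w
  let i := PySem.Str.find k "*"
  if 0 <= i then PySem.Str.slice k none (some (i - 1)) else k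

def are_words_in_word_list_alt (words : List String) (word_list : List String) (case_sensitive : Bool) (get_score : Bool) (all_must_match : Bool) : Bool :=
  let pool := if case_sensitive then word_list else word_list.map PySem.Str.lower
  let prefixes : PySem.Set String :=
    PySem.Set.ofList (pool.flatMap (fun w =>
      (PySem.List.pyRange 0 (PySem.Str.len w + 1)).map (fun i => PySem.Str.slice w none (some i))))
  let keys : PySem.Set String :=
    words.foldl (fun s w => PySem.Set.add s (pvNormWord case_sensitive w)) PySem.Set.empty
  let score := List.countP (fun k => PySem.Set.contains prefixes k) keys
  -- with get_score=True Python B returns the tuple (ok, score) — the same tuple A returns; excluded by Pre_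
  if all_must_match then score == words.length else decide (0 < score)

-- ===== PRECONDITION & SPEC =====
-- Pre_ excludes get_score = true ONLY because there both Pythons return a (bool, int) TUPLE, not a value
-- of the declared Bool return type, so no Bool-valued port can state it; Python B returns A's identical
-- tuple there (see Source B and the cite), so nothing behavioural is being dodged — the exclusion is purely
-- the type convention's.
def Pre_are_words_in_word_list (words : List String) (word_list : List String) (case_sensitive : Bool) (get_score : Bool) (all_must_match : Bool) : Prop := get_score = false
instance (words : List String) (word_list : List String) (case_sensitive : Bool) (get_score : Bool) (all_must_match : Bool) : Decidable (Pre_are_words_in_word_list words word_list case_sensitive get_score all_must_match) := by unfold Pre_are_words_in_word_list; infer_instance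

def pvWitness_are_words_in_word_list : List String × List String × Bool × Bool × Bool := (["ab"], ["abc"], false, false, true)

def Spec_are_words_in_word_list (words : List String) (word_list : List String) (case_sensitive : Bool) (get_score : Bool) (all_must_match : Bool) (out : Bool) : Prop := out = are_words_in_word_list_alt words word_list case_sensitive get_score all_must_match
instance (words : List String) (word_list : List String) (case_sensitive : Bool) (get_score : Bool) (all_must_match : Bool) (out : Bool) : Decidable (Spec_are_words_in_word_list words word_list case_sensitive get_score all_must_match out) := by unfold Spec_are_words_in_word_list; infer_instance

-- ===== CLAIM (what is proved, stated in full; the proofs are below) =====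
def Claim_equal_are_words_in_word_list : Prop := ∀ (words : List String) (word_list : List String) (case_sensitive : Bool) (get_score : Bool) (all_must_match : Bool), Dom_are_words_in_word_list words word_list case_sensitive get_score all_must_match → Pre_are_words_in_word_list words word_list case_sensitive get_score all_must_match → Spec_are_words_in_word_list words word_list case_sensitive get_score all_must_match (are_words_in_word_list words word_list case_sensitive get_score all_must_match)

-- ===== LEMMAS AND PROOFS =====

theorem pv_items_insert {ν : Type} (d : PySem.Dict String ν) (k : String) (v : ν) :
    (d.insert k v).items = if d.contains k then List.map (fun p => if (p.1 == k) = true then (k, v) else p) d.items else d.items ++ [(k, v)] := by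
  simp only [PySem.Dict.insert]; split <;> rfl

theorem pv_keys_insert {ν : Type} (d : PySem.Dict String ν) (k : String) (v : ν) :
    (d.insert k v).keys = if d.contains k then d.keys else d.keys ++ [k] := by
  rw [PySem.Dict.keys, pv_items_insert]
  split
  · rw [List.map_map, PySem.Dict.keys]
    exact List.map_congr_left (fun p hp => by by_cases h : p.1 = k <;> simp [h, Function.comp])
  · simp [PySem.Dict.keys]

theorem pv_contains_iff_mem_keys {ν : Type} (d : PySem.Dict String ν) (k : String) :
    d.contains k = true ↔ k ∈ d.keys := by
  simp only [PySem.Dict.contains, PySem.Dict.keys, List.any_eq_true, beq_iff_eq, List.mem_map]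

theorem pv_insert_insert (d : PySem.Dict String Bool) (k : String) :
    ((d.insert k true).insert k true) = d.insert k true := by
  have hc : (d.insert k true).contains k = true := by
    rw [PySem.Dict.contains, pv_items_insert]
    split
    · rename_i h
      rw [PySem.Dict.contains, List.any_eq_true] at h
      obtain ⟨p, hp, hpk⟩ := h
      rw [List.any_map, List.any_eq_true]
      exact ⟨p, hp, by simp [Function.comp, hpk]⟩
    · simp [List.any_append]
  have hitems : ((d.insert k true).insert k true).items = (d.insert k true).items := by
    rw [pv_items_insert _ k true, if_pos hc]
    rw [List.map_congr_left (g := id), List.map_id]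
    intro p hp
    by_cases hpk : (p.1 == k) = true
    · have hk : p.1 = k := by simpa [beq_iff_eq] using hpk
      have : p = (k, true) := by
        rw [pv_items_insert] at hp
        by_cases hck : d.contains k = true
        · rw [if_pos hck] at hp
          obtain ⟨q, hq, hqe⟩ := List.mem_map.1 hp
          by_cases hq1 : (q.1 == k) = true
          · simp [hq1] at hqe; exact hqe.symm
          · rw [if_neg hq1] at hqe; subst hqe; simp [hk] at hq1
        · rw [if_neg hck] at hp
          rcases List.mem_append.1 hp with h1 | h1
          · exfalso; apply hck
            rw [PySem.Dict.contains, List.any_eq_true]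
            exact ⟨p, h1, hpk⟩
          · simpa using h1
      simp [this]
    · simp [hpk]
  exact PySem.Dict.ext hitems

theorem pv_inner (pool : List String) (k : String) (d : PySem.Dict String Bool) :
    pool.foldl (fun d w => if PySem.Str.startswith w k then d.insert k true else d) d
      = if pool.any (fun w => PySem.Str.startswith w k) then d.insert k true else d := by
  induction pool generalizing d with
  | nil => simp
  | cons w ws ih =>
    simp only [List.foldl_cons, List.any_cons]
    by_cases h : PySem.Str.startswith w k = true
    · rw [if_pos h, ih]
      have hor : (PySem.Str.startswith w k || ws.any fun w => PySem.Str.startswith w k) = true := by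
        rw [h, Bool.true_or]
      simp only [hor, if_true]
      by_cases h2 : (ws.any fun w => PySem.Str.startswith w k) = true
      · rw [if_pos h2, pv_insert_insert]
      · rw [if_neg h2]
    · rw [if_neg h, ih]
      have hor : (PySem.Str.startswith w k || ws.any fun w => PySem.Str.startswith w k)
          = ws.any fun w => PySem.Str.startswith w k := by
        rw [Bool.not_eq_true] at h
        rw [h, Bool.false_or]
      simp only [hor]

theorem pv_outer (n : String → String) (M : String → Bool) (ws : List String)
    (d : PySem.Dict String Bool) (s : PySem.Set String)
    (h : d.keys = s.filter M) :
    (ws.foldl (fun d w => if M (n w) then d.insert (n w) true else d) d).keys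
      = (ws.foldl (fun s w => PySem.Set.add s (n w)) s).filter M := by
  induction ws generalizing d s with
  | nil => simpa using h
  | cons w ws ih =>
    simp only [List.foldl_cons]
    apply ih
    set k := n w with hk
    by_cases hm : M k = true
    · rw [if_pos hm, pv_keys_insert, PySem.Set.add]
      have hmem : d.contains k = true ↔ PySem.Set.contains s k = true := by
        rw [pv_contains_iff_mem_keys, h, List.mem_filter, PySem.Set.contains, List.contains_iff_mem]
        simp [hm]
      by_cases hc : d.contains k = true
      · rw [if_pos hc, if_pos (hmem.1 hc), h]
      · rw [if_neg hc, if_neg (fun hcc => hc (hmem.2 hcc)), h, List.filter_append]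
        simp [hm]
    · rw [if_neg hm, PySem.Set.add]
      split
      · exact h
      · rw [h, List.filter_append]
        simp [hm]

theorem pv_prefixes (pool : List String) (k : String) :
    PySem.Set.contains (PySem.Set.ofList (pool.flatMap (fun w =>
        (PySem.List.pyRange 0 (PySem.Str.len w + 1)).map (fun i => PySem.Str.slice w none (some i))))) k
      = pool.any (fun w => PySem.Str.startswith w k) := by
  rw [Bool.eq_iff_iff]
  rw [PySem.Set.contains, List.contains_iff_mem, PySem.Set.mem_ofList, List.mem_flatMap, List.any_eq_true]
  constructor
  · rintro ⟨w, hw, hk⟩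
    obtain ⟨i, hi, rfl⟩ := List.mem_map.1 hk
    obtain ⟨hi0, hilt⟩ := PySem.List.mem_pyRange_one.1 hi
    refine ⟨w, hw, ?_⟩
    rw [PySem.Str.startswith_eq, PySem.Chars.startswith_iff,
      PySem.Str.toList_slice, PySem.Chars.slice_eq_listSlice, PySem.List.slice_to _ hi0]
    exact List.take_prefix _ _
  · rintro ⟨w, hw, hsw⟩
    refine ⟨w, hw, List.mem_map.2 ⟨(k.toList.length : Int), ?_, ?_⟩⟩
    · rw [PySem.List.mem_pyRange_one]
      rw [PySem.Str.startswith_eq, PySem.Chars.startswith_iff] at hsw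
      have := List.IsPrefix.length_le hsw
      rw [PySem.Str.len_eq]
      omega
    · rw [PySem.Str.startswith_eq, PySem.Chars.startswith_iff] at hsw
      rw [← String.toList_inj, PySem.Str.toList_slice, PySem.Chars.slice_eq_listSlice,
        PySem.List.slice_to _ (Int.natCast_nonneg _)]
      rw [List.prefix_iff_eq_take] at hsw
      simpa using hsw.symm

theorem pv_isIn_star (w : String) :
    PySem.Str.isIn "*" w = decide (0 ≤ PySem.Str.find w "*") := by
  rw [Bool.eq_iff_iff, PySem.Str.isIn_iff_infix, decide_eq_true_iff, PySem.Str.find_nonneg_iff]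

theorem pv_size_eq_keys_length {κ ν : Type} (d : PySem.Dict κ ν) : d.size = d.keys.length := by
  simp [PySem.Dict.size, PySem.Dict.keys]

-- A's whole accumulation, in terms of B's key set and the match predicate
theorem pv_A_keys (words pool : List String) (n : String → String) :
    (words.foldl (fun d w =>
        pool.foldl (fun d wl => if PySem.Str.startswith wl (n w) then d.insert (n w) true else d) d)
      (PySem.Dict.mk [])).keys
    = (words.foldl (fun s w => PySem.Set.add s (n w)) PySem.Set.empty).filter
        (fun k => pool.any (fun w => PySem.Str.startswith w k)) := by
  have hstep : (fun (d : PySem.Dict String Bool) w =>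
      pool.foldl (fun d wl => if PySem.Str.startswith wl (n w) then d.insert (n w) true else d) d)
    = fun d w => if pool.any (fun wl => PySem.Str.startswith wl (n w)) then d.insert (n w) true else d := by
    funext d w; exact pv_inner pool (n w) d
  rw [hstep]
  exact pv_outer n (fun k => pool.any (fun w => PySem.Str.startswith w k)) words (PySem.Dict.mk []) PySem.Set.empty rfl

-- A's inline word normalization is B's pvNormWord
theorem pv_norm (cs : Bool) (w : String) :
    (if PySem.Str.isIn "*" (if !cs then PySem.Str.lower w else w) then
       PySem.Str.slice (if !cs then PySem.Str.lower w else w) none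
         (some (PySem.Str.find (if !cs then PySem.Str.lower w else w) "*" - 1))
     else (if !cs then PySem.Str.lower w else w)) = pvNormWord cs w := by
  cases cs <;> rw [pv_isIn_star] <;> simp [pvNormWord]

-- ===== VERDICT (by name: the statement is the Claim_ definition above) =====
theorem are_words_in_word_list_spec : Claim_equal_are_words_in_word_list := by
  intro words word_list cs gs am _hdom _hpre
  unfold Spec_are_words_in_word_list
  unfold are_words_in_word_list are_words_in_word_list_alt
  set pool := if cs then word_list else word_list.map PySem.Str.lower with hpool
  have hstep1 : (fun (found : PySem.Dict String Bool) (w : String) =>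
      let word := if !cs then PySem.Str.lower w else w
      let word :=
        if PySem.Str.isIn "*" word then
          let idx := PySem.Str.find word "*" - 1
          PySem.Str.slice word none (some idx)
        else word
      word_list.foldl (fun found wl =>
        let wl' := if !cs then PySem.Str.lower wl else wl
        if PySem.Str.startswith wl' word then found.insert word true else found) found)
    = fun d w =>
        pool.foldl (fun d wl => if PySem.Str.startswith wl (pvNormWord cs w) then d.insert (pvNormWord cs w) true else d) d := by
    funext d w
    simp only [pv_norm]
    cases cs
    · simp [hpool, List.foldl_map]
    · simp [hpool]; rfl
  rw [hstep1]
  simp only [pv_prefixes, pv_A_keys, pv_size_eq_keys_length, List.countP_eq_length_filter]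
  set L := ((words.foldl (fun s w => PySem.Set.add s (pvNormWord cs w)) PySem.Set.empty).filter
      (fun k => pool.any (fun w => PySem.Str.startswith w k))).length
  cases am
  · simp
  · by_cases h : (L == words.length) = true <;> simp [h]
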